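-- pv_equiv track=rewrite | github.com/MolfarUA/CodeWars_Solutions | 1 kyu/Break the pieces (Evilized Edition)/solution.py | zoom_in_shape
-- ===== SOURCE A (Python) =====
-- def zoom_in_shape(shape):
--     m, n = len(shape), len(shape) and max(map(len, shape))
--     zoom = [[' '] * (2 * n - 1) for _ in range(2 * m - 1)]
--     for x, line in enumerate(shape):
--         for y, c in enumerate(line):
--             zoom[2*x][2*y] = c
--     for x in range(1, len(zoom), 2):
--         for y in range(0, len(zoom[x]), 2):
--             if zoom[x-1][y] in '+|' and zoom[x+1][y] in '+|':
--                 zoom[x][y] = '|'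
--     for x in range(0, len(zoom), 2):
--         for y in range(1, len(zoom[x]), 2):
--             if zoom[x][y-1] in '+-' and zoom[x][y+1] in '+-':
--                 zoom[x][y] = '-'
--     zoom = list(map(lambda s:''.join(s).rstrip(), zoom))
--     return zoom
-- ===== SOURCE B (Python) =====
-- def zoom_in_shape(shape):
--     m = len(shape)
--     if m == 0:
--         return []
--     n = max(map(len, shape))
--
--     def get(x, y):
--         return shape[x][y] if x < m and y < len(shape[x]) else ' '
--
--     def cell(i, j):
--         x, y = i // 2, j // 2
--         if i % 2 == 0 and j % 2 == 0:
--             return get(x, y)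
--         if i % 2 == 1 and j % 2 == 0:
--             return '|' if get(x, y) in '+|' and get(x + 1, y) in '+|' else ' '
--         if i % 2 == 0:
--             return '-' if get(x, y) in '+-' and get(x, y + 1) in '+-' else ' '
--         return ' '
--
--     return [''.join(cell(i, j) for j in range(2 * n - 1)).rstrip()
--             for i in range(2 * m - 1)]
-- ===== Notes on version B (the rewrite author's own statement) =====
-- stated objective: simpler
-- what changed: A allocates a mutable 2x grid and fills it in three separate mutation passes (scatter chars, then vertical connectors, then horizontal connectors); B has no grid at all and builds each output row directly with one pure per-cell function dispatching on coordinate parity, reading only the original shape.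
import Mathlib
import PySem

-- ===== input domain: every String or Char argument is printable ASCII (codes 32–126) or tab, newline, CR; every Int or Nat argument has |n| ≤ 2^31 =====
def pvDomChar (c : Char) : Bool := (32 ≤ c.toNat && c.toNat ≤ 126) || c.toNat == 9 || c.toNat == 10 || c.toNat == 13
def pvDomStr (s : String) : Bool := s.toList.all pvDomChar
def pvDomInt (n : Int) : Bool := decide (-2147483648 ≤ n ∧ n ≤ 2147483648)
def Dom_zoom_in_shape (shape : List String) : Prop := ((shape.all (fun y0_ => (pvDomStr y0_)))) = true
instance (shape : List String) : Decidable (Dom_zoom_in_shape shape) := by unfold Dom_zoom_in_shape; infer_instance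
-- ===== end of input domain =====

-- B replaces A's mutable 2x grid and its three mutation passes by one pure per-cell
-- function dispatched on coordinate parity (objective: simpler).

-- ===== PORT A =====
-- `c in '+|'` for a one-character c is membership among the pattern's characters
def pvInA (c : Char) (s : List Char) : Bool := s.contains c
-- zoom[x]: every use has 0 ≤ x < len(zoom), where pyGet? is some and .getD [] never fires
def pvRowA (z : List (List Char)) (x : Int) : List Char := (PySem.List.pyGet? z x).getD []
-- zoom[x][y]: every use is in range, where the .getD ' ' never fires
def pvCellA (z : List (List Char)) (x y : Int) : Char := (PySem.List.pyGet? (pvRowA z x) y).getD ' '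
-- zoom[x][y] = c : at every use 0 ≤ x, 0 ≤ y and both are in range, so List.set is exact
def pvPutA (z : List (List Char)) (x y : Int) (c : Char) : List (List Char) :=
  z.set x.toNat ((pvRowA z x).set y.toNat c)

def zoom_in_shape (shape : List String) : List String :=
  let m : Int := shape.length
  -- `len(shape) and max(map(len, shape))` : 0 when shape is empty, else the max (getD never fires)
  let n : Int := if m = 0 then 0 else (PySem.List.max? (shape.map PySem.Str.len) (fun v => v)).getD 0
  -- [[' '] * (2*n-1) for _ in range(2*m-1)] (negative counts give empty, as .toNat does)
  let zoom0 : List (List Char) := List.replicate (2 * m - 1).toNat (List.replicate (2 * n - 1).toNat ' ')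
  let z1 := (PySem.List.enumerate shape).foldl (fun z xl =>
      (PySem.List.enumerate xl.2.toList).foldl (fun z yc => pvPutA z (2 * xl.1) (2 * yc.1) yc.2) z) zoom0
  let z2 := (PySem.List.pyRange 1 (z1.length : Int) 2).foldl (fun z x =>
      (PySem.List.pyRange 0 ((pvRowA z x).length : Int) 2).foldl (fun z y =>
        if pvInA (pvCellA z (x - 1) y) ['+', '|'] && pvInA (pvCellA z (x + 1) y) ['+', '|'] then
          pvPutA z x y '|'
        else z) z) z1
  let z3 := (PySem.List.pyRange 0 (z2.length : Int) 2).foldl (fun z x =>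
      (PySem.List.pyRange 1 ((pvRowA z x).length : Int) 2).foldl (fun z y =>
        if pvInA (pvCellA z x (y - 1)) ['+', '-'] && pvInA (pvCellA z x (y + 1)) ['+', '-'] then
          pvPutA z x y '-'
        else z) z) z2
  z3.map (fun r => String.mk (PySem.Chars.rstrip r))

-- ===== PORT B =====
-- shape[x][y] if 0 <= x < m and y < len(shape[x]) else ' '  (the guards make getD exact)
def pvGetB (shape : List String) (x y : Nat) : Char :=
  if x < shape.length ∧ y < (shape.getD x "").toList.length then (shape.getD x "").toList.getD y ' ' else ' '

def pvCellB (shape : List String) (i j : Nat) : Char :=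
  let x := i / 2
  let y := j / 2
  if i % 2 = 0 ∧ j % 2 = 0 then pvGetB shape x y
  else if i % 2 = 1 ∧ j % 2 = 0 then
    if ['+', '|'].contains (pvGetB shape x y) && ['+', '|'].contains (pvGetB shape (x + 1) y) then '|' else ' '
  else if i % 2 = 0 then
    if ['+', '-'].contains (pvGetB shape x y) && ['+', '-'].contains (pvGetB shape x (y + 1)) then '-' else ' '
  else ' '

def zoom_in_shape_alt (shape : List String) : List String :=
  if shape.length = 0 then []
  else
    let n : Int := (PySem.List.max? (shape.map PySem.Str.len) (fun v => v)).getD 0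
    -- range(2*n-1) is empty for n = 0, as .toNat gives
    (List.range (2 * shape.length - 1)).map (fun i =>
      String.mk (PySem.Chars.rstrip ((List.range (2 * n - 1).toNat).map (fun j => pvCellB shape i j))))

-- ===== PRECONDITION & SPEC =====
def Spec_zoom_in_shape (shape : List String) (out : List String) : Prop := out = zoom_in_shape_alt shape
instance (shape : List String) (out : List String) : Decidable (Spec_zoom_in_shape shape out) := by unfold Spec_zoom_in_shape; infer_instance

-- ===== CLAIM (what is proved, stated in full; the proofs are below) =====
def Claim_equal_zoom_in_shape : Prop := ∀ (shape : List String), Dom_zoom_in_shape shape → Spec_zoom_in_shape shape (zoom_in_shape shape)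

-- ===== LEMMAS AND PROOFS =====

-- proof-side abbreviations: grid dimensions, the pure grid representation, and the
-- cell contents after each of A's three mutation passes
def gN (shape : List String) : Int :=
  if shape.length = 0 then 0 else (PySem.List.max? (shape.map PySem.Str.len) (fun v => v)).getD 0
def gR (shape : List String) : Nat := (2 * (shape.length : Int) - 1).toNat
def gC (shape : List String) : Nat := (2 * gN shape - 1).toNat
def grid (shape : List String) (f : Nat → Nat → Char) : List (List Char) :=
  (List.range (gR shape)).map (fun i => (List.range (gC shape)).map (f i))

def getc (shape : List String) (x y : Nat) : Char := (shape.getD x "").toList.getD y ' '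
def base (shape : List String) (i j : Nat) : Char :=
  if i % 2 = 0 ∧ j % 2 = 0 then getc shape (i / 2) (j / 2) else ' '
def vC (shape : List String) (i j : Nat) : Bool :=
  pvInA (base shape (i - 1) j) ['+', '|'] && pvInA (base shape (i + 1) j) ['+', '|']
def base2 (shape : List String) (i j : Nat) : Char :=
  if i % 2 = 1 ∧ j % 2 = 0 ∧ vC shape i j = true then '|' else base shape i j
def hC (shape : List String) (i j : Nat) : Bool :=
  pvInA (base shape i (j - 1)) ['+', '-'] && pvInA (base shape i (j + 1)) ['+', '-']
def base3 (shape : List String) (i j : Nat) : Char :=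
  if i % 2 = 0 ∧ j % 2 = 1 ∧ hC shape i j = true then '-' else base2 shape i j

lemma grid_congr {shape : List String} {f g : Nat → Nat → Char}
    (h : ∀ i j, f i j = g i j) : grid shape f = grid shape g := by
  have : f = g := funext fun i => funext (h i)
  rw [this]

lemma grid_eq_of_agree {shape : List String} {f g : Nat → Nat → Char}
    (h : ∀ i, i < gR shape → ∀ j, j < gC shape → f i j = g i j) :
    grid shape f = grid shape g := by
  unfold grid
  refine List.map_congr_left fun i hi => ?_
  refine List.map_congr_left fun j hj => ?_
  exact h i (List.mem_range.mp hi) j (List.mem_range.mp hj)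

lemma grid_length {shape : List String} (f : Nat → Nat → Char) :
    (grid shape f).length = gR shape := by simp [grid]

lemma grid_row {shape : List String} (f : Nat → Nat → Char) {x : Int}
    (h0 : 0 ≤ x) (h1 : x < (gR shape : Int)) :
    pvRowA (grid shape f) x = (List.range (gC shape)).map (f x.toNat) := by
  unfold pvRowA grid
  rw [← Int.toNat_of_nonneg h0, PySem.List.pyGet?_natCast]
  have hx : x.toNat < gR shape := by omega
  simp [hx]
  intro a _
  congr 1
  omega

lemma grid_row_length {shape : List String} (f : Nat → Nat → Char) {x : Int}
    (h0 : 0 ≤ x) (h1 : x < (gR shape : Int)) :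
    ((pvRowA (grid shape f) x).length : Int) = (gC shape : Int) := by
  rw [grid_row f h0 h1]; simp

lemma grid_get {shape : List String} (f : Nat → Nat → Char) {x y : Int}
    (hx0 : 0 ≤ x) (hx1 : x < (gR shape : Int)) (hy0 : 0 ≤ y) (hy1 : y < (gC shape : Int)) :
    pvCellA (grid shape f) x y = f x.toNat y.toNat := by
  unfold pvCellA
  rw [grid_row f hx0 hx1, ← Int.toNat_of_nonneg hy0, PySem.List.pyGet?_natCast]
  have hy : y.toNat < gC shape := by omega
  simp [hy]
  congr 1
  omega

lemma grid_set {shape : List String} (f : Nat → Nat → Char) {x y : Int} (c : Char)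
    (hx0 : 0 ≤ x) (hx1 : x < (gR shape : Int)) (hy0 : 0 ≤ y) (hy1 : y < (gC shape : Int)) :
    pvPutA (grid shape f) x y c
      = grid shape (fun i j => if i = x.toNat ∧ j = y.toNat then c else f i j) := by
  have hx : x.toNat < gR shape := by omega
  have hy : y.toNat < gC shape := by omega
  unfold pvPutA
  rw [grid_row f hx0 hx1]
  unfold grid
  apply List.ext_getElem
  · simp
  · intro i h1 h2
    rw [List.getElem_set]
    simp only [List.getElem_map, List.getElem_range]
    by_cases hix : x.toNat = i
    · rw [if_pos hix]
      subst hix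
      apply List.ext_getElem
      · simp
      · intro j hj1 hj2
        rw [List.getElem_set]
        simp only [List.getElem_map, List.getElem_range]
        by_cases hjy : y.toNat = j
        · rw [if_pos hjy]; subst hjy; simp
        · rw [if_neg hjy]
          have hj' : ¬ (j = y.toNat) := fun h => hjy h.symm
          simp [hj']
    · rw [if_neg hix]
      refine List.map_congr_left fun j _ => ?_
      have : ¬ (i = x.toNat ∧ j = y.toNat) := fun h => hix h.1.symm
      simp [this]

lemma gN_nonneg (shape : List String) : 0 ≤ gN shape := by
  unfold gN
  split_ifs with h
  · exact le_refl 0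
  · rcases hmax : PySem.List.max? (shape.map PySem.Str.len) (fun v => v) with _ | v
    · simp
    · have hv := PySem.List.max?_mem hmax
      simp only [List.mem_map] at hv
      obtain ⟨s, _, hs⟩ := hv
      simp only [Option.getD_some]
      rw [← hs, PySem.Str.len_eq]
      positivity

lemma len_le_gN {shape : List String} {s : String} (hs : s ∈ shape) :
    (s.toList.length : Int) ≤ gN shape := by
  unfold gN
  have hne : shape ≠ [] := by rintro rfl; simp at hs
  rw [if_neg (by simpa using fun h => hne (List.length_eq_zero_iff.mp h))]
  rcases hmax : PySem.List.max? (shape.map PySem.Str.len) (fun v => v) with _ | v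
  · rw [PySem.List.max?_eq_none_iff] at hmax
    simp [hne] at hmax
  · have := PySem.List.max?_isMax hmax (PySem.Str.len s) (List.mem_map_of_mem hs)
    simpa [PySem.Str.len_eq] using this

lemma gR_odd (shape : List String) : gR shape = 0 ∨ gR shape % 2 = 1 := by
  unfold gR; omega

lemma gC_odd (shape : List String) : gC shape = 0 ∨ gC shape % 2 = 1 := by
  unfold gC
  have := gN_nonneg shape
  omega

-- ---- scatter pass ----

lemma scatter_inner (shape : List String) (x : Int) (hx0 : 0 ≤ x)
    (hx : 2 * x < (gR shape : Int)) :
    ∀ (cs : List Char) (s : Int) (_hs : 0 ≤ s)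
      (_hlen : s + cs.length ≤ gN shape)
      (g : Nat → Nat → Char),
    (PySem.List.enumerate cs s).foldl (fun z yc => pvPutA z (2 * x) (2 * yc.1) yc.2) (grid shape g)
      = grid shape (fun i j =>
          if i = (2 * x).toNat ∧ j % 2 = 0 ∧ s.toNat ≤ j / 2 ∧ j / 2 < s.toNat + cs.length
          then cs.getD (j / 2 - s.toNat) ' ' else g i j) := by
  intro cs
  induction cs with
  | nil =>
    intro s _ _ g
    rw [PySem.List.enumerate_nil, List.foldl_nil]
    apply grid_congr; intro i j
    rw [eq_comm, if_neg]
    rintro ⟨-, -, h3, h4⟩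
    simp only [List.length_nil] at h4
    omega
  | cons c cs IH =>
    intro s hs hlen g
    simp only [List.length_cons] at hlen
    have hgN : 1 ≤ gN shape := by omega
    have hgC : (gC shape : Int) = 2 * gN shape - 1 := by unfold gC; omega
    rw [PySem.List.enumerate_cons]
    simp only [List.foldl_cons]
    rw [grid_set g c (by omega) hx (by omega) (by omega)]
    rw [IH (s + 1) (by omega) (by omega) _]
    apply grid_congr; intro i j
    have hA : (2 * s).toNat = 2 * s.toNat := by omega
    have hS : (s + 1).toNat = s.toNat + 1 := by omega
    rw [hA, hS]
    by_cases hi : i = (2 * x).toNat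
    · subst hi
      by_cases hp : j % 2 = 0
      · by_cases h1 : s.toNat + 1 ≤ j / 2 ∧ j / 2 < s.toNat + 1 + cs.length
        · rw [if_pos ⟨rfl, hp, h1.1, h1.2⟩,
              if_pos (show _ ∧ _ ∧ _ ∧ _ from ⟨rfl, hp, by omega, by simp only [List.length_cons]; omega⟩)]
          have hd : j / 2 - s.toNat = (j / 2 - (s.toNat + 1)) + 1 := by omega
          rw [hd, List.getD_cons_succ]
        · rw [if_neg (by rintro ⟨-, -, h3, h4⟩; exact h1 ⟨h3, h4⟩)]
          by_cases h2 : j / 2 = s.toNat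
          · rw [if_pos ⟨rfl, by omega⟩,
                if_pos (show _ ∧ _ ∧ _ ∧ _ from ⟨rfl, hp, by omega, by simp only [List.length_cons]; omega⟩)]
            have hd : j / 2 - s.toNat = 0 := by omega
            rw [hd, List.getD_cons_zero]
          · rw [if_neg (by rintro ⟨-, hj⟩; omega), eq_comm,
                if_neg (by rintro ⟨-, -, h3, h4⟩; simp only [List.length_cons] at h4; omega)]
      · rw [if_neg (by rintro ⟨-, hp2, -⟩; exact hp hp2),
            if_neg (by rintro ⟨-, hj⟩; omega), eq_comm,
            if_neg (by rintro ⟨-, hp2, -⟩; exact hp hp2)]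
    · rw [if_neg (by rintro ⟨h, -⟩; exact hi h),
          if_neg (by rintro ⟨h, -⟩; exact hi h), eq_comm,
          if_neg (by rintro ⟨h, -⟩; exact hi h)]

lemma scatter_outer (shape : List String) :
    ∀ (ss : List String) (t : Nat) (_hdrop : shape.drop t = ss)
      (g : Nat → Nat → Char),
    (PySem.List.enumerate ss (t : Int)).foldl (fun z xl =>
        (PySem.List.enumerate xl.2.toList).foldl (fun z yc => pvPutA z (2 * xl.1) (2 * yc.1) yc.2) z)
        (grid shape g)
      = grid shape (fun i j =>
          if i % 2 = 0 ∧ t ≤ i / 2 ∧ i / 2 < t + ss.length ∧ j % 2 = 0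
             ∧ j / 2 < (shape.getD (i / 2) "").toList.length
          then getc shape (i / 2) (j / 2) else g i j) := by
  intro ss
  induction ss with
  | nil =>
    intro t _ g
    rw [PySem.List.enumerate_nil, List.foldl_nil]
    apply grid_congr; intro i j
    rw [eq_comm, if_neg]
    rintro ⟨-, h2, h3, -⟩
    simp only [List.length_nil] at h3
    omega
  | cons line ss IH =>
    intro t hdrop g
    have htlen : t < shape.length := by
      by_contra h
      rw [List.drop_eq_nil_of_le (by omega)] at hdrop
      exact List.cons_ne_nil _ _ hdrop.symm
    have hline : shape.getD t "" = line := by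
      have : (shape.drop t).getD 0 "" = line := by rw [hdrop]; rfl
      rwa [List.getD_eq_getElem?_getD, List.getElem?_drop, Nat.add_zero,
           ← List.getD_eq_getElem?_getD] at this
    have hmem : line ∈ shape := by
      have : line ∈ shape.drop t := by rw [hdrop]; exact List.mem_cons_self
      exact List.drop_subset _ _ this
    have hdrop' : shape.drop (t + 1) = ss := by
      have : (shape.drop t).drop 1 = ss := by rw [hdrop]; rfl
      rwa [List.drop_drop] at this
    have hgRt : 2 * (t : Int) < (gR shape : Int) := by unfold gR; omega
    rw [PySem.List.enumerate_cons]
    simp only [List.foldl_cons]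
    rw [scatter_inner shape (t : Int) (by omega) hgRt line.toList 0 le_rfl
          (by simpa using len_le_gN hmem) g]
    have hcast : ((t : Int) + 1) = ((t + 1 : Nat) : Int) := by omega
    rw [hcast, IH (t + 1) hdrop' _]
    apply grid_congr; intro i j
    have hA : (2 * (t : Int)).toNat = 2 * t := by omega
    rw [hA]
    simp only [Int.toNat_zero, Nat.zero_add, Nat.zero_le, Nat.sub_zero, true_and]
    by_cases hIH : i % 2 = 0 ∧ t + 1 ≤ i / 2 ∧ i / 2 < t + 1 + ss.length ∧ j % 2 = 0
               ∧ j / 2 < (shape.getD (i / 2) "").toList.length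
    · rw [if_pos hIH, eq_comm,
          if_pos ⟨hIH.1, by omega, by simp only [List.length_cons]; omega, hIH.2.2.2⟩]
    · rw [if_neg hIH]
      by_cases hrow : i = 2 * t ∧ j % 2 = 0 ∧ j / 2 < line.toList.length
      · rw [if_pos hrow, eq_comm,
          if_pos (show _ ∧ _ ∧ _ ∧ _ ∧ _ from
            ⟨by omega, by omega, by simp only [List.length_cons]; omega, hrow.2.1,
             by rw [show i / 2 = t by omega, hline]; exact hrow.2.2⟩)]
        unfold getc
        rw [show i / 2 = t by omega, hline]
      · rw [if_neg hrow, eq_comm, if_neg]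
        rintro ⟨h1, h2, h3, h4, h5⟩
        simp only [List.length_cons] at h3
        by_cases ht : i / 2 = t
        · exact hrow ⟨by omega, h4, by rw [← hline, ← ht]; exact h5⟩
        · exact hIH ⟨h1, by omega, by omega, h4, h5⟩

-- ---- vertical-connector pass ----

lemma pass2_inner (shape : List String) (x : Int) (hx0 : 0 ≤ x) (hxp : x % 2 = 1)
    (hx : x + 1 < (gR shape : Int)) :
    ∀ (ys : List Int) (_hys : ∀ y ∈ ys, 0 ≤ y ∧ y < (gC shape : Int) ∧ y % 2 = 0)
      (g : Nat → Nat → Char) (_hg : ∀ i j, i % 2 = 0 → g i j = base shape i j),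
    ys.foldl (fun z y =>
        if pvInA (pvCellA z (x - 1) y) ['+', '|'] && pvInA (pvCellA z (x + 1) y) ['+', '|'] then
          pvPutA z x y '|'
        else z) (grid shape g)
      = grid shape (fun i j =>
          if i = x.toNat ∧ (j : Int) ∈ ys ∧ vC shape i j = true then '|' else g i j) := by
  intro ys
  induction ys with
  | nil =>
    intro _ g _
    rw [List.foldl_nil]
    apply grid_congr; intro i j
    rw [eq_comm, if_neg (by rintro ⟨-, h2, -⟩; simp at h2)]
  | cons y ys IH =>
    intro hys g hg
    obtain ⟨hy0, hy1, hy2⟩ := hys y List.mem_cons_self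
    have hx1 : 1 ≤ x := by omega
    rw [List.foldl_cons]
    rw [grid_get g (by omega) (by omega) hy0 hy1,
        grid_get g (by omega) (by omega) hy0 hy1]
    have hxm : x.toNat % 2 = 1 := by omega
    have hvc : (pvInA (g (x - 1).toNat y.toNat) ['+', '|'] &&
                pvInA (g (x + 1).toNat y.toNat) ['+', '|'])
              = vC shape x.toNat y.toNat := by
      rw [hg _ _ (by omega), hg _ _ (by omega)]
      unfold vC
      rw [show (x - 1).toNat = x.toNat - 1 by omega, show (x + 1).toNat = x.toNat + 1 by omega]
    rw [hvc]
    by_cases hb : vC shape x.toNat y.toNat = true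
    · rw [if_pos hb, grid_set g '|' (by omega) (by omega) hy0 hy1]
      rw [IH (fun y' hy' => hys y' (List.mem_cons_of_mem _ hy')) _
            (fun i j hij => by
              rw [if_neg (by rintro ⟨h, -⟩; omega)]
              exact hg i j hij)]
      apply grid_congr; intro i j
      by_cases hi : i = x.toNat
      · subst hi
        by_cases h1 : (j : Int) ∈ ys ∧ vC shape x.toNat j = true
        · rw [if_pos ⟨rfl, h1.1, h1.2⟩, eq_comm,
              if_pos ⟨rfl, List.mem_cons_of_mem _ h1.1, h1.2⟩]
        · rw [if_neg (by rintro ⟨-, h2, h3⟩; exact h1 ⟨h2, h3⟩)]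
          by_cases h2 : j = y.toNat
          · rw [if_pos ⟨rfl, h2⟩, eq_comm,
                if_pos ⟨rfl, by rw [h2, Int.toNat_of_nonneg hy0]; exact List.mem_cons_self,
                        by rw [h2]; exact hb⟩]
          · rw [if_neg (by rintro ⟨-, h3⟩; exact h2 h3), eq_comm, if_neg]
            rintro ⟨-, h3, h4⟩
            rcases List.mem_cons.mp h3 with h5 | h5
            · exact h2 (by omega)
            · exact h1 ⟨h5, h4⟩
      · rw [if_neg (by rintro ⟨h, -⟩; exact hi h), if_neg (by rintro ⟨h, -⟩; exact hi h),
            eq_comm, if_neg (by rintro ⟨h, -⟩; exact hi h)]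
    · rw [if_neg hb]
      rw [IH (fun y' hy' => hys y' (List.mem_cons_of_mem _ hy')) _ hg]
      apply grid_congr; intro i j
      by_cases h1 : i = x.toNat ∧ (j : Int) ∈ ys ∧ vC shape i j = true
      · rw [if_pos h1, eq_comm, if_pos ⟨h1.1, List.mem_cons_of_mem _ h1.2.1, h1.2.2⟩]
      · rw [if_neg h1, eq_comm, if_neg]
        rintro ⟨h2, h3, h4⟩
        rcases List.mem_cons.mp h3 with h5 | h5
        · subst h2
          have : j = y.toNat := by omega
          rw [this] at h4
          exact hb h4
        · exact h1 ⟨h2, h5, h4⟩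

lemma pass2_outer (shape : List String) :
    ∀ (xs : List Int) (_hxs : ∀ x ∈ xs, 1 ≤ x ∧ x < (gR shape : Int) ∧ x % 2 = 1)
      (g : Nat → Nat → Char) (_hg : ∀ i j, i % 2 = 0 → g i j = base shape i j),
    xs.foldl (fun z x =>
        (PySem.List.pyRange 0 ((pvRowA z x).length : Int) 2).foldl (fun z y =>
          if pvInA (pvCellA z (x - 1) y) ['+', '|'] && pvInA (pvCellA z (x + 1) y) ['+', '|'] then
            pvPutA z x y '|'
          else z) z) (grid shape g)
      = grid shape (fun i j =>
          if (i : Int) ∈ xs ∧ j % 2 = 0 ∧ j < gC shape ∧ vC shape i j = true then '|' else g i j) := by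
  intro xs
  induction xs with
  | nil =>
    intro _ g _
    rw [List.foldl_nil]
    apply grid_congr; intro i j
    rw [eq_comm, if_neg (by rintro ⟨h1, -⟩; simp at h1)]
  | cons x xs IH =>
    intro hxs g hg
    obtain ⟨hx1, hx2, hx3⟩ := hxs x List.mem_cons_self
    have hgRo : gR shape % 2 = 1 := by
      rcases gR_odd shape with h | h
      · omega
      · exact h
    rw [List.foldl_cons, grid_row_length g (by omega) hx2]
    have hmem : ∀ y ∈ PySem.List.pyRange 0 (gC shape : Int) 2,
        0 ≤ y ∧ y < (gC shape : Int) ∧ y % 2 = 0 := by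
      intro y hy
      rw [PySem.List.mem_pyRange_iff_of_pos (by omega)] at hy
      omega
    rw [pass2_inner shape x (by omega) hx3 (by omega) _ hmem g hg]
    have hxm : x.toNat % 2 = 1 := by omega
    rw [IH (fun x' hx' => hxs x' (List.mem_cons_of_mem _ hx')) _
          (fun i j hij => by
            rw [if_neg (by rintro ⟨h, -⟩; omega)]
            exact hg i j hij)]
    apply grid_congr; intro i j
    have hrange : ((j : Int) ∈ PySem.List.pyRange 0 (gC shape : Int) 2)
        ↔ (j % 2 = 0 ∧ j < gC shape) := by
      rw [PySem.List.mem_pyRange_iff_of_pos (by omega)]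
      constructor
      · rintro ⟨-, h2, h3⟩; constructor <;> omega
      · rintro ⟨h1, h2⟩; refine ⟨by omega, by omega, by omega⟩
    by_cases hIH : (i : Int) ∈ xs ∧ j % 2 = 0 ∧ j < gC shape ∧ vC shape i j = true
    · rw [if_pos hIH, eq_comm,
          if_pos ⟨List.mem_cons_of_mem _ hIH.1, hIH.2.1, hIH.2.2.1, hIH.2.2.2⟩]
    · rw [if_neg hIH]
      by_cases hrow : i = x.toNat ∧ (j : Int) ∈ PySem.List.pyRange 0 (gC shape : Int) 2
                       ∧ vC shape i j = true
      · rw [if_pos hrow, eq_comm, if_pos]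
        obtain ⟨h1, h2, h3⟩ := hrow
        obtain ⟨h4, h5⟩ := hrange.mp h2
        exact ⟨by rw [h1, Int.toNat_of_nonneg (by omega)]; exact List.mem_cons_self, h4, h5, h3⟩
      · rw [if_neg hrow, eq_comm, if_neg]
        rintro ⟨h1, h2, h3, h4⟩
        rcases List.mem_cons.mp h1 with h5 | h5
        · exact hrow ⟨by omega, hrange.mpr ⟨h2, h3⟩, h4⟩
        · exact hIH ⟨h5, h2, h3, h4⟩

-- ---- horizontal-connector pass ----

lemma pass3_inner (shape : List String) (x : Int) (hx0 : 0 ≤ x) (hxp : x % 2 = 0)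
    (hx : x < (gR shape : Int)) :
    ∀ (ys : List Int) (_hys : ∀ y ∈ ys, 1 ≤ y ∧ y + 1 < (gC shape : Int) ∧ y % 2 = 1)
      (g : Nat → Nat → Char) (_hg : ∀ i j, i % 2 = 0 → j % 2 = 0 → g i j = base shape i j),
    ys.foldl (fun z y =>
        if pvInA (pvCellA z x (y - 1)) ['+', '-'] && pvInA (pvCellA z x (y + 1)) ['+', '-'] then
          pvPutA z x y '-'
        else z) (grid shape g)
      = grid shape (fun i j =>
          if i = x.toNat ∧ (j : Int) ∈ ys ∧ hC shape i j = true then '-' else g i j) := by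
  intro ys
  induction ys with
  | nil =>
    intro _ g _
    rw [List.foldl_nil]
    apply grid_congr; intro i j
    rw [eq_comm, if_neg (by rintro ⟨-, h2, -⟩; simp at h2)]
  | cons y ys IH =>
    intro hys g hg
    obtain ⟨hy0, hy1, hy2⟩ := hys y List.mem_cons_self
    rw [List.foldl_cons]
    rw [grid_get g hx0 hx (by omega) (by omega),
        grid_get g hx0 hx (by omega) (by omega)]
    have hxm : x.toNat % 2 = 0 := by omega
    have hvc : (pvInA (g x.toNat (y - 1).toNat) ['+', '-'] &&
                pvInA (g x.toNat (y + 1).toNat) ['+', '-'])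
              = hC shape x.toNat y.toNat := by
      rw [hg _ _ (by omega) (by omega), hg _ _ (by omega) (by omega)]
      unfold hC
      rw [show (y - 1).toNat = y.toNat - 1 by omega, show (y + 1).toNat = y.toNat + 1 by omega]
    rw [hvc]
    by_cases hb : hC shape x.toNat y.toNat = true
    · rw [if_pos hb, grid_set g '-' hx0 hx (by omega) (by omega)]
      rw [IH (fun y' hy' => hys y' (List.mem_cons_of_mem _ hy')) _
            (fun i j hi hj => by
              rw [if_neg (by rintro ⟨-, h⟩; omega)]
              exact hg i j hi hj)]
      apply grid_congr; intro i j
      by_cases hi : i = x.toNat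
      · subst hi
        by_cases h1 : (j : Int) ∈ ys ∧ hC shape x.toNat j = true
        · rw [if_pos ⟨rfl, h1.1, h1.2⟩, eq_comm,
              if_pos ⟨rfl, List.mem_cons_of_mem _ h1.1, h1.2⟩]
        · rw [if_neg (by rintro ⟨-, h2, h3⟩; exact h1 ⟨h2, h3⟩)]
          by_cases h2 : j = y.toNat
          · rw [if_pos ⟨rfl, h2⟩, eq_comm,
                if_pos ⟨rfl, by rw [h2, Int.toNat_of_nonneg (by omega : (0:Int) ≤ y)]; exact List.mem_cons_self,
                        by rw [h2]; exact hb⟩]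
          · rw [if_neg (by rintro ⟨-, h3⟩; exact h2 h3), eq_comm, if_neg]
            rintro ⟨-, h3, h4⟩
            rcases List.mem_cons.mp h3 with h5 | h5
            · exact h2 (by omega)
            · exact h1 ⟨h5, h4⟩
      · rw [if_neg (by rintro ⟨h, -⟩; exact hi h), if_neg (by rintro ⟨h, -⟩; exact hi h),
            eq_comm, if_neg (by rintro ⟨h, -⟩; exact hi h)]
    · rw [if_neg hb]
      rw [IH (fun y' hy' => hys y' (List.mem_cons_of_mem _ hy')) _ hg]
      apply grid_congr; intro i j
      by_cases h1 : i = x.toNat ∧ (j : Int) ∈ ys ∧ hC shape i j = true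
      · rw [if_pos h1, eq_comm, if_pos ⟨h1.1, List.mem_cons_of_mem _ h1.2.1, h1.2.2⟩]
      · rw [if_neg h1, eq_comm, if_neg]
        rintro ⟨h2, h3, h4⟩
        rcases List.mem_cons.mp h3 with h5 | h5
        · subst h2
          have : j = y.toNat := by omega
          rw [this] at h4
          exact hb h4
        · exact h1 ⟨h2, h5, h4⟩

lemma pass3_outer (shape : List String) :
    ∀ (xs : List Int) (_hxs : ∀ x ∈ xs, 0 ≤ x ∧ x < (gR shape : Int) ∧ x % 2 = 0)
      (g : Nat → Nat → Char) (_hg : ∀ i j, i % 2 = 0 → j % 2 = 0 → g i j = base shape i j),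
    xs.foldl (fun z x =>
        (PySem.List.pyRange 1 ((pvRowA z x).length : Int) 2).foldl (fun z y =>
          if pvInA (pvCellA z x (y - 1)) ['+', '-'] && pvInA (pvCellA z x (y + 1)) ['+', '-'] then
            pvPutA z x y '-'
          else z) z) (grid shape g)
      = grid shape (fun i j =>
          if (i : Int) ∈ xs ∧ j % 2 = 1 ∧ j + 1 < gC shape ∧ hC shape i j = true then '-' else g i j) := by
  intro xs
  induction xs with
  | nil =>
    intro _ g _
    rw [List.foldl_nil]
    apply grid_congr; intro i j
    rw [eq_comm, if_neg (by rintro ⟨h1, -⟩; simp at h1)]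
  | cons x xs IH =>
    intro hxs g hg
    obtain ⟨hx1, hx2, hx3⟩ := hxs x List.mem_cons_self
    have hgCo : gC shape = 0 ∨ gC shape % 2 = 1 := gC_odd shape
    rw [List.foldl_cons, grid_row_length g (by omega) hx2]
    have hmem : ∀ y ∈ PySem.List.pyRange 1 (gC shape : Int) 2,
        1 ≤ y ∧ y + 1 < (gC shape : Int) ∧ y % 2 = 1 := by
      intro y hy
      rw [PySem.List.mem_pyRange_iff_of_pos (by omega)] at hy
      omega
    rw [pass3_inner shape x hx1 hx3 hx2 _ hmem g hg]
    have hxm : x.toNat % 2 = 0 := by omega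
    rw [IH (fun x' hx' => hxs x' (List.mem_cons_of_mem _ hx')) _
          (fun i j hi hj => by
            rw [if_neg (by
              rintro ⟨-, h, -⟩
              rw [PySem.List.mem_pyRange_iff_of_pos (by omega)] at h
              omega)]
            exact hg i j hi hj)]
    apply grid_congr; intro i j
    have hrange : ((j : Int) ∈ PySem.List.pyRange 1 (gC shape : Int) 2)
        ↔ (j % 2 = 1 ∧ j + 1 < gC shape) := by
      rw [PySem.List.mem_pyRange_iff_of_pos (by omega)]
      constructor
      · rintro ⟨h1, h2, h3⟩
        have hj1 : 1 ≤ j := by omega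
        constructor <;> omega
      · rintro ⟨h1, h2⟩; refine ⟨by omega, by omega, by omega⟩
    by_cases hIH : (i : Int) ∈ xs ∧ j % 2 = 1 ∧ j + 1 < gC shape ∧ hC shape i j = true
    · rw [if_pos hIH, eq_comm,
          if_pos ⟨List.mem_cons_of_mem _ hIH.1, hIH.2.1, hIH.2.2.1, hIH.2.2.2⟩]
    · rw [if_neg hIH]
      by_cases hrow : i = x.toNat ∧ (j : Int) ∈ PySem.List.pyRange 1 (gC shape : Int) 2
                       ∧ hC shape i j = true
      · rw [if_pos hrow, eq_comm, if_pos]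
        obtain ⟨h1, h2, h3⟩ := hrow
        obtain ⟨h4, h5⟩ := hrange.mp h2
        exact ⟨by rw [h1, Int.toNat_of_nonneg (by omega)]; exact List.mem_cons_self, h4, h5, h3⟩
      · rw [if_neg hrow, eq_comm, if_neg]
        rintro ⟨h1, h2, h3, h4⟩
        rcases List.mem_cons.mp h1 with h5 | h5
        · exact hrow ⟨by omega, hrange.mpr ⟨h2, h3⟩, h4⟩
        · exact hIH ⟨h5, h2, h3, h4⟩

-- ---- assembling A ----

lemma zoom_eq_grid (shape : List String) :
    zoom_in_shape shape = (grid shape (base3 shape)).map (fun r => String.mk (PySem.Chars.rstrip r)) := by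
  have hn : (if (shape.length : Int) = 0 then 0
             else (PySem.List.max? (shape.map PySem.Str.len) (fun v => v)).getD 0) = gN shape := by
    unfold gN
    by_cases h : shape.length = 0 <;> simp [h]
  have h0 : List.replicate (2 * (shape.length : Int) - 1).toNat
      (List.replicate (2 * gN shape - 1).toNat ' ') = grid shape (fun _ _ => ' ') := by
    unfold grid gR gC
    rw [List.map_const', List.length_range, List.map_const', List.length_range]
  have hsc := scatter_outer shape shape 0 List.drop_zero (fun _ _ => ' ')
  simp only [Nat.cast_zero, Nat.zero_add, Nat.zero_le, true_and] at hsc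
  have hbase : grid shape (fun i j =>
      if i % 2 = 0 ∧ i / 2 < shape.length ∧ j % 2 = 0
         ∧ j / 2 < (shape.getD (i / 2) "").toList.length
      then getc shape (i / 2) (j / 2) else ' ') = grid shape (base shape) := by
    apply grid_eq_of_agree
    intro i hi j hj
    have hilt : i / 2 < shape.length := by unfold gR at hi; omega
    unfold base
    by_cases hpi : i % 2 = 0
    · by_cases hpj : j % 2 = 0
      · by_cases hjr : j / 2 < (shape.getD (i / 2) "").toList.length
        · rw [if_pos ⟨hpi, hilt, hpj, hjr⟩, if_pos ⟨hpi, hpj⟩]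
        · rw [if_neg (by rintro ⟨-, -, -, h⟩; exact hjr h), if_pos ⟨hpi, hpj⟩, eq_comm]
          unfold getc
          exact List.getD_eq_default _ _ (by omega)
      · rw [if_neg (by rintro ⟨-, -, h, -⟩; exact hpj h),
            if_neg (by rintro ⟨-, h⟩; exact hpj h)]
    · rw [if_neg (by rintro ⟨h, -, -, -⟩; exact hpi h), if_neg (by rintro ⟨h, -⟩; exact hpi h)]
  have hxs2 : ∀ x ∈ PySem.List.pyRange 1 (gR shape : Int) 2,
      1 ≤ x ∧ x < (gR shape : Int) ∧ x % 2 = 1 := by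
    intro x hx
    rw [PySem.List.mem_pyRange_iff_of_pos (by omega)] at hx
    omega
  have hp2 := pass2_outer shape (PySem.List.pyRange 1 (gR shape : Int) 2) hxs2
      (base shape) (fun _ _ _ => rfl)
  have hbase2 : grid shape (fun i j =>
      if (i : Int) ∈ PySem.List.pyRange 1 (gR shape : Int) 2 ∧ j % 2 = 0 ∧ j < gC shape
         ∧ vC shape i j = true
      then '|' else base shape i j) = grid shape (base2 shape) := by
    apply grid_eq_of_agree
    intro i hi j hj
    unfold base2
    by_cases hc : i % 2 = 1 ∧ j % 2 = 0 ∧ vC shape i j = true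
    · rw [if_pos ⟨by
          rw [PySem.List.mem_pyRange_iff_of_pos (by omega)]
          refine ⟨by omega, by omega, by omega⟩, hc.2.1, hj, hc.2.2⟩, if_pos hc]
    · rw [if_neg (by
        rintro ⟨h1, h2, -, h4⟩
        rw [PySem.List.mem_pyRange_iff_of_pos (by omega)] at h1
        exact hc ⟨by omega, h2, h4⟩), if_neg hc]
  have hxs3 : ∀ x ∈ PySem.List.pyRange 0 (gR shape : Int) 2,
      0 ≤ x ∧ x < (gR shape : Int) ∧ x % 2 = 0 := by
    intro x hx
    rw [PySem.List.mem_pyRange_iff_of_pos (by omega)] at hx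
    omega
  have hg3 : ∀ i j, i % 2 = 0 → j % 2 = 0 → base2 shape i j = base shape i j := by
    intro i j hi _
    unfold base2
    rw [if_neg (by rintro ⟨h, -⟩; omega)]
  have hp3 := pass3_outer shape (PySem.List.pyRange 0 (gR shape : Int) 2) hxs3
      (base2 shape) hg3
  have hgCo := gC_odd shape
  have hbase3 : grid shape (fun i j =>
      if (i : Int) ∈ PySem.List.pyRange 0 (gR shape : Int) 2 ∧ j % 2 = 1 ∧ j + 1 < gC shape
         ∧ hC shape i j = true
      then '-' else base2 shape i j) = grid shape (base3 shape) := by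
    apply grid_eq_of_agree
    intro i hi j hj
    unfold base3
    by_cases hc : i % 2 = 0 ∧ j % 2 = 1 ∧ hC shape i j = true
    · rw [if_pos ⟨by
          rw [PySem.List.mem_pyRange_iff_of_pos (by omega)]
          refine ⟨by omega, by omega, by omega⟩, hc.2.1, by omega, hc.2.2⟩, if_pos hc]
    · rw [if_neg (by
        rintro ⟨h1, h2, -, h4⟩
        rw [PySem.List.mem_pyRange_iff_of_pos (by omega)] at h1
        exact hc ⟨by omega, h2, h4⟩), if_neg hc]
  simp only [zoom_in_shape]
  rw [hn, h0, hsc, hbase, grid_length, hp2, hbase2, grid_length, hp3, hbase3]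

-- ---- the per-cell comparison ----

lemma getB_eq (shape : List String) (x y : Nat) : pvGetB shape x y = getc shape x y := by
  unfold pvGetB getc
  split_ifs with h
  · rfl
  · rcases Nat.lt_or_ge x shape.length with hx | hx
    · rcases Nat.lt_or_ge y (shape.getD x "").toList.length with hy | hy
      · exact absurd ⟨hx, hy⟩ h
      · rw [List.getD_eq_default _ _ hy]
    · rw [List.getD_eq_default _ _ hx]
      simp [List.getD]

lemma cell_eq (shape : List String) (i j : Nat) : base3 shape i j = pvCellB shape i j := by
  have hgB : ∀ x y, pvGetB shape x y = getc shape x y := getB_eq shape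
  simp only [pvCellB, hgB]
  rcases Nat.mod_two_eq_zero_or_one i with hi | hi <;>
    rcases Nat.mod_two_eq_zero_or_one j with hj | hj
  · rw [if_pos ⟨hi, hj⟩]
    unfold base3 base2 base
    rw [if_neg (by rintro ⟨-, h, -⟩; omega), if_neg (by rintro ⟨h, -⟩; omega),
        if_pos ⟨hi, hj⟩]
  · rw [if_neg (by rintro ⟨-, h⟩; omega), if_neg (by rintro ⟨h, -⟩; omega), if_pos hi]
    have hb1 : base shape i (j - 1) = getc shape (i / 2) (j / 2) := by
      unfold base
      rw [if_pos ⟨hi, by omega⟩]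
      congr 1
      omega
    have hb2 : base shape i (j + 1) = getc shape (i / 2) (j / 2 + 1) := by
      unfold base
      rw [if_pos ⟨hi, by omega⟩]
      congr 1
      omega
    have hcc : (List.contains ['+', '-'] (getc shape (i / 2) (j / 2)) &&
                List.contains ['+', '-'] (getc shape (i / 2) (j / 2 + 1))) = hC shape i j := by
      unfold hC pvInA
      rw [hb1, hb2]
    rw [hcc]
    unfold base3
    by_cases hc : hC shape i j = true
    · rw [if_pos ⟨hi, hj, hc⟩, if_pos hc]
    · rw [if_neg (by rintro ⟨-, -, h⟩; exact hc h), if_neg hc]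
      unfold base2 base
      rw [if_neg (by rintro ⟨h, -⟩; omega), if_neg (by rintro ⟨-, h⟩; omega)]
  · rw [if_neg (by rintro ⟨h, -⟩; omega), if_pos ⟨hi, hj⟩]
    have hb1 : base shape (i - 1) j = getc shape (i / 2) (j / 2) := by
      unfold base
      rw [if_pos ⟨by omega, hj⟩]
      congr 1
      omega
    have hb2 : base shape (i + 1) j = getc shape (i / 2 + 1) (j / 2) := by
      unfold base
      rw [if_pos ⟨by omega, hj⟩]
      congr 1
      omega
    have hcc : (List.contains ['+', '|'] (getc shape (i / 2) (j / 2)) &&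
                List.contains ['+', '|'] (getc shape (i / 2 + 1) (j / 2))) = vC shape i j := by
      unfold vC pvInA
      rw [hb1, hb2]
    rw [hcc]
    unfold base3
    rw [if_neg (by rintro ⟨h, -⟩; omega)]
    unfold base2
    by_cases hc : vC shape i j = true
    · rw [if_pos ⟨hi, hj, hc⟩, if_pos hc]
    · rw [if_neg (by rintro ⟨-, -, h⟩; exact hc h), if_neg hc]
      unfold base
      rw [if_neg (by rintro ⟨h, -⟩; omega)]
  · unfold base3 base2 base
    rw [if_neg (by rintro ⟨h, -⟩; omega), if_neg (by rintro ⟨-, h, -⟩; omega),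
        if_neg (by rintro ⟨-, h⟩; omega), if_neg (by rintro ⟨h, -⟩; omega),
        if_neg (by rintro ⟨-, h⟩; omega), if_neg (by omega : ¬ i % 2 = 0)]

theorem zoom_final (shape : List String) : zoom_in_shape shape = zoom_in_shape_alt shape := by
  rw [zoom_eq_grid]
  have hcell : base3 shape = pvCellB shape :=
    funext fun i => funext fun j => cell_eq shape i j
  unfold zoom_in_shape_alt
  by_cases hm : shape.length = 0
  · rw [if_pos hm]
    have hR : gR shape = 0 := by unfold gR; omega
    unfold grid
    rw [hR]
    rfl
  · rw [if_neg hm]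
    have hR : gR shape = 2 * shape.length - 1 := by unfold gR; omega
    have hN : gN shape = (PySem.List.max? (shape.map PySem.Str.len) (fun v => v)).getD 0 := by
      unfold gN
      rw [if_neg hm]
    unfold grid
    rw [List.map_map, hR]
    refine List.map_congr_left fun i _ => ?_
    simp only [Function.comp]
    congr 1
    rw [hcell]
    unfold gC
    rw [hN]

-- ===== VERDICT (by name: the statement is the Claim_ definition above) =====
theorem zoom_in_shape_spec : Claim_equal_zoom_in_shape := by
  intro shape _
  unfold Spec_zoom_in_shape
  exact zoom_final shape
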